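-- pv_equiv track=rewrite | github.com/IchBinJade/advent-of-code-python | 2024/day20.py | calc_new_cheat_times
-- ===== SOURCE A (Python) =====
-- def calc_new_cheat_times(dist_matrix, dist=20):
--     cheat_times = {}
--
--     for row, col in dist_matrix:
--         for dr in range(-dist, dist + 1, 1):
--             for dc in range(-dist, dist + 1, 1):
--                 if abs(dr) + abs(dc) <= 20:
--                     next_row, next_col = row + dr, col + dc
--                     if (next_row, next_col) in dist_matrix:
--                         if dist_matrix[(row, col)] > dist_matrix[(next_row, next_col)]:
--                             new_time = dist_matrix[(row, col)] - dist_matrix[(next_row, next_col)] - abs(dr) - abs(dc)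
--                             if new_time > 0:
--                                 cheat_times[((row, col), (next_row, next_col))] = new_time
--
--     return cheat_times
-- ===== SOURCE B (Python) =====
-- def calc_new_cheat_times(dist_matrix, dist=20):
--     cheat_times = {}
--     keys = sorted(dist_matrix)
--     for p, start_time in dist_matrix.items():
--         for q in keys:
--             dr = q[0] - p[0]
--             dc = q[1] - p[1]
--             if abs(dr) <= dist and abs(dc) <= dist and abs(dr) + abs(dc) <= 20:
--                 saving = start_time - dist_matrix[q] - abs(dr) - abs(dc)
--                 if saving > 0:
--                     cheat_times[(p, q)] = saving
--     return cheat_times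
-- ===== Notes on version B (the rewrite author's own statement) =====
-- stated objective: alternative
-- what changed: Replaces A's fixed diamond-of-offsets probe (scan all (2*dist+1)^2 offsets around each point and test dict membership) by a direct pairwise scan: for each point, walk the sorted key list once and keep pairs within the per-coordinate box bound `dist` and the hardcoded Manhattan-20 bound with positive saving.
import Mathlib
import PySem

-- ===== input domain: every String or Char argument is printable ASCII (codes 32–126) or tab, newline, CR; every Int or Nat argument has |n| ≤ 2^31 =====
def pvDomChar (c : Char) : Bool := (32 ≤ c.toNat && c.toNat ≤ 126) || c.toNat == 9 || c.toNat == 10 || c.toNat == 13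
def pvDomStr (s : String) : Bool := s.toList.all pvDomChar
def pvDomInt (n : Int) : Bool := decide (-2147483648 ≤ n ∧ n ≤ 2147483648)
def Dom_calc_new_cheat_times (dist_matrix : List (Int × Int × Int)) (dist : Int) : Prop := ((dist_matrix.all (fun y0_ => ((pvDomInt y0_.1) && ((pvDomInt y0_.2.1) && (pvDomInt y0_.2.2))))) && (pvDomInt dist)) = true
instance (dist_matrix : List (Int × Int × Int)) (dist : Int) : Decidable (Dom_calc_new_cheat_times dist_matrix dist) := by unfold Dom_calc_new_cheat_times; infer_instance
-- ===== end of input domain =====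

-- B is an ALTERNATIVE implementation (pairwise scan over sorted keys instead of A's
-- fixed diamond-of-offsets membership probe); same cost class, not claimed faster.

-- shared input decoding: the dict argument arrives as an association list; build the Python dict
def pvDict (dm : List (Int × Int × Int)) : PySem.Dict (Int × Int) Int :=
  dm.foldl (fun d t => d.insert (t.1, t.2.1) t.2.2) PySem.Dict.empty

-- ===== PORT A =====
def calc_new_cheat_times (dist_matrix : List (Int × Int × Int)) (dist : Int) : List ((Int × Int) × (Int × Int) × Int) :=
  let d := pvDict dist_matrix
  let rng := PySem.List.pyRange (-dist) (dist + 1) 1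
  ((d.keys.foldl (fun ct p =>
      rng.foldl (fun ct dr =>
        rng.foldl (fun ct dc =>
          if |dr| + |dc| ≤ 20 then
            if d.contains (p.1 + dr, p.2 + dc) then
              if d.getD p 0 > d.getD (p.1 + dr, p.2 + dc) 0 then
                if d.getD p 0 - d.getD (p.1 + dr, p.2 + dc) 0 - |dr| - |dc| > 0 then
                  ct.insert (p, (p.1 + dr, p.2 + dc)) (d.getD p 0 - d.getD (p.1 + dr, p.2 + dc) 0 - |dr| - |dc|)
                else ct
              else ct
            else ct
          else ct) ct) ct) (PySem.Dict.empty)).items).map (fun e => (e.1.1, e.1.2, e.2))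

-- ===== PORT B =====
def calc_new_cheat_times_alt (dist_matrix : List (Int × Int × Int)) (dist : Int) : List ((Int × Int) × (Int × Int) × Int) :=
  let d := pvDict dist_matrix
  let ks := PySem.List.sorted2 d.keys (fun q => q.1) (fun q => q.2)
  ((d.items.foldl (fun ct pv =>
      ks.foldl (fun ct q =>
        if |q.1 - pv.1.1| ≤ dist ∧ |q.2 - pv.1.2| ≤ dist ∧ |q.1 - pv.1.1| + |q.2 - pv.1.2| ≤ 20 then
          if pv.2 - d.getD q 0 - |q.1 - pv.1.1| - |q.2 - pv.1.2| > 0 then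
            ct.insert (pv.1, q) (pv.2 - d.getD q 0 - |q.1 - pv.1.1| - |q.2 - pv.1.2|)
          else ct
        else ct) ct) (PySem.Dict.empty)).items).map (fun e => (e.1.1, e.1.2, e.2))

-- ===== PRECONDITION & SPEC =====
def Spec_calc_new_cheat_times (dist_matrix : List (Int × Int × Int)) (dist : Int) (out : List ((Int × Int) × (Int × Int) × Int)) : Prop := out = calc_new_cheat_times_alt dist_matrix dist
instance (dist_matrix : List (Int × Int × Int)) (dist : Int) (out : List ((Int × Int) × (Int × Int) × Int)) : Decidable (Spec_calc_new_cheat_times dist_matrix dist out) := by unfold Spec_calc_new_cheat_times; infer_instance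

-- ===== CLAIM (what is proved, stated in full; the proofs are below) =====
def Claim_equal_calc_new_cheat_times : Prop := ∀ (dist_matrix : List (Int × Int × Int)) (dist : Int), Dom_calc_new_cheat_times dist_matrix dist → Spec_calc_new_cheat_times dist_matrix dist (calc_new_cheat_times dist_matrix dist)

-- ===== LEMMAS AND PROOFS =====

-- the common per-source-point filter on candidate target points q
def pvC (d : PySem.Dict (Int × Int) Int) (dist : Int) (pk : Int × Int) (pv : Int) (q : Int × Int) : Bool :=
  d.contains q
    && decide (|q.1 - pk.1| ≤ dist ∧ |q.2 - pk.2| ≤ dist ∧ |q.1 - pk.1| + |q.2 - pk.2| ≤ 20)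
    && decide (0 < pv - d.getD q 0 - |q.1 - pk.1| - |q.2 - pk.2|)

-- the entry written for a kept pair (pk, q)
def pvG (d : PySem.Dict (Int × Int) Int) (pk : Int × Int) (pv : Int) (q : Int × Int) : ((Int × Int) × (Int × Int)) × Int :=
  ((pk, q), pv - d.getD q 0 - |q.1 - pk.1| - |q.2 - pk.2|)

lemma pv_nodup_keys (dm : List (Int × Int × Int)) : (pvDict dm).keys.Nodup := by
  unfold pvDict
  exact PySem.Dict.nodup_keys_foldl_insert_key dm (fun t => (t.1, t.2.1)) (fun _ t => t.2.2)
    PySem.Dict.empty PySem.Dict.nodup_keys_empty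

lemma pv_foldl_ite {α β : Type} (l : List α) (c : α → Bool) (f : β → α → β) (init : β) :
    l.foldl (fun a i => if c i then f a i else a) init = (l.filter c).foldl f init := by
  induction l generalizing init with
  | nil => rfl
  | cons x xs ih =>
    simp only [List.foldl_cons, List.filter_cons]
    by_cases h : c x <;> simp [h, ih]

lemma pv_foldl_foldl_flatMap {α β γ : Type} (l : List α) (g : α → List β) (f : γ → β → γ) (init : γ) :
    l.foldl (fun acc a => (g a).foldl f acc) init = (l.flatMap g).foldl f init := by
  induction l generalizing init with
  | nil => rfl
  | cons x xs ih => simp [List.flatMap_cons, List.foldl_append, ih]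

lemma pv_sorted2_eq (xs : List (Int × Int)) :
    PySem.List.sorted2 xs (fun q => q.1) (fun q => q.2)
      = PySem.List.sorted xs (fun q => (toLex q : Lex (Int × Int))) := by
  have h : (fun a b : Int × Int => decide (a.1 < b.1) || (!decide (b.1 < a.1) && decide (a.2 < b.2)))
      = (fun a b : Int × Int => decide ((toLex a : Lex (Int × Int)) < toLex b)) := by
    funext a b
    simp only [← decide_not, ← Bool.decide_and, ← Bool.decide_or, decide_eq_decide, Prod.Lex.toLex_lt_toLex]
    omega
  show List.foldl (fun acc x => PySem.List.insertBy
      (fun a b : Int × Int => decide (a.1 < b.1) || (!decide (b.1 < a.1) && decide (a.2 < b.2))) x acc) [] xs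
    = List.foldl (fun acc x => PySem.List.insertBy
      (fun a b : Int × Int => decide ((toLex a : Lex (Int × Int)) < toLex b)) x acc) [] xs
  rw [h]

-- the crux: A's diamond scan around pk, filtered, lists exactly the kept q's in lexicographic
-- order, i.e. equals the filtered sorted key list that B walks
lemma pv_qlists_eq (d : PySem.Dict (Int × Int) Int) (hnd : d.keys.Nodup) (dist : Int)
    (pk : Int × Int) (pv : Int) :
    (PySem.List.pyRange (-dist) (dist + 1) 1).flatMap (fun dr =>
        ((PySem.List.pyRange (-dist) (dist + 1) 1).map (fun dc => (pk.1 + dr, pk.2 + dc))).filter (pvC d dist pk pv))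
      = (PySem.List.sorted2 d.keys (fun q => q.1) (fun q => q.2)).filter (pvC d dist pk pv) := by
  rw [pv_sorted2_eq]
  have hmemC : ∀ q : Int × Int, pvC d dist pk pv q = true →
      q ∈ d.keys ∧ |q.1 - pk.1| ≤ dist ∧ |q.2 - pk.2| ≤ dist := by
    intro q hq
    simp only [pvC, Bool.and_eq_true, decide_eq_true_eq] at hq
    exact ⟨(PySem.Dict.contains_iff_mem_keys _ _).mp hq.1.1, hq.1.2.1, hq.1.2.2.1⟩
  have hndL : List.Pairwise (fun a b : Int × Int => (toLex a : Lex (Int × Int)) < toLex b)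
      ((PySem.List.pyRange (-dist) (dist + 1) 1).flatMap (fun dr =>
        ((PySem.List.pyRange (-dist) (dist + 1) 1).map (fun dc => (pk.1 + dr, pk.2 + dc))).filter (pvC d dist pk pv))) := by
    rw [List.pairwise_flatMap]
    constructor
    · intro dr _
      apply List.Pairwise.filter
      apply List.Pairwise.map (R := (· < ·))
      · intro a b hab
        rw [Prod.Lex.toLex_lt_toLex]
        right
        exact ⟨rfl, by omega⟩
      · exact PySem.List.pairwise_lt_pyRange_one _ _
    · apply (PySem.List.pairwise_lt_pyRange_one _ _).imp
      intro dr1 dr2 h12 x hx y hy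
      have hx' : x.1 = pk.1 + dr1 := by
        rcases List.mem_map.mp (List.mem_of_mem_filter hx) with ⟨dc, _, rfl⟩
        rfl
      have hy' : y.1 = pk.1 + dr2 := by
        rcases List.mem_map.mp (List.mem_of_mem_filter hy) with ⟨dc, _, rfl⟩
        rfl
      rw [Prod.Lex.toLex_lt_toLex]
      left
      omega
  have hR : (PySem.List.sorted d.keys (fun q => (toLex q : Lex (Int × Int)))).Nodup := by
    exact ((PySem.List.sorted_perm _ _ _).nodup_iff).mpr hnd
  apply PySem.List.eq_of_perm_of_pairwise_le_of_injective
      (key := fun q : Int × Int => (toLex q : Lex (Int × Int))) toLex.injective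
  · rw [List.perm_ext_iff_of_nodup
      (hndL.imp (fun {a b} h he => absurd (he ▸ h) (lt_irrefl _))) (hR.filter _)]
    intro q
    simp only [List.mem_flatMap, List.mem_filter, List.mem_map, PySem.List.mem_pyRange_one,
      PySem.List.mem_sorted]
    constructor
    · rintro ⟨dr, hdr, ⟨dc, hdc, rfl⟩, hq⟩
      exact ⟨(hmemC _ hq).1, hq⟩
    · rintro ⟨hqk, hq⟩
      obtain ⟨-, h1, h2⟩ := hmemC _ hq
      have h1' := abs_le.mp h1
      have h2' := abs_le.mp h2
      obtain ⟨x, y⟩ := q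
      refine ⟨x - pk.1, by constructor <;> omega, ⟨⟨y - pk.2, by constructor <;> omega, ?_⟩, hq⟩⟩
      simp only [Prod.mk.injEq]
      constructor <;> omega
  · exact hndL.imp (fun {a b} h => le_of_lt h)
  · exact (PySem.List.sorted_pairwise d.keys _).filter _

-- A's inner double loop over offsets, as a fold of inserts over the canonical entry list
lemma pv_innerA (d : PySem.Dict (Int × Int) Int) (hnd : d.keys.Nodup) (dist : Int)
    (pk : Int × Int) (hpk : pk ∈ d.keys) (ct : PySem.Dict ((Int × Int) × (Int × Int)) Int) :
    (PySem.List.pyRange (-dist) (dist + 1) 1).foldl (fun ct dr =>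
        (PySem.List.pyRange (-dist) (dist + 1) 1).foldl (fun ct dc =>
          if |dr| + |dc| ≤ 20 then
            if d.contains (pk.1 + dr, pk.2 + dc) then
              if d.getD pk 0 > d.getD (pk.1 + dr, pk.2 + dc) 0 then
                if d.getD pk 0 - d.getD (pk.1 + dr, pk.2 + dc) 0 - |dr| - |dc| > 0 then
                  ct.insert (pk, (pk.1 + dr, pk.2 + dc)) (d.getD pk 0 - d.getD (pk.1 + dr, pk.2 + dc) 0 - |dr| - |dc|)
                else ct
              else ct
            else ct
          else ct) ct) ct
      = (((PySem.List.sorted2 d.keys (fun q => q.1) (fun q => q.2)).filter (pvC d dist pk (d.getD pk 0))).map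
          (pvG d pk (d.getD pk 0))).foldl (fun ct e => ct.insert e.1 e.2) ct := by
  rw [← pv_qlists_eq d hnd dist pk (d.getD pk 0)]
  rw [List.map_flatMap]
  rw [← pv_foldl_foldl_flatMap _ _ (fun ct (e : ((Int × Int) × (Int × Int)) × Int) => ct.insert e.1 e.2) ct]
  apply PySem.List.foldl_congr_mem
  intro ct dr hdr
  have hdrb : -dist ≤ dr ∧ dr < dist + 1 := PySem.List.mem_pyRange_one.mp hdr
  rw [List.filter_map, List.map_map, List.foldl_map]
  simp only [Function.comp_def]
  rw [← pv_foldl_ite _ _ _ ct]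
  apply PySem.List.foldl_congr_mem
  intro ct dc hdc
  have hdcb : -dist ≤ dc ∧ dc < dist + 1 := PySem.List.mem_pyRange_one.mp hdc
  simp only [pvC, pvG, add_sub_cancel_left]
  by_cases h20 : |dr| + |dc| ≤ 20
  · by_cases hco : d.contains (pk.1 + dr, pk.2 + dc)
    · by_cases hsav : 0 < d.getD pk 0 - d.getD (pk.1 + dr, pk.2 + dc) 0 - |dr| - |dc|
      · have hdr1 : |dr| ≤ dist := abs_le.mpr ⟨by omega, by omega⟩
        have hdc1 : |dc| ≤ dist := abs_le.mpr ⟨by omega, by omega⟩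
        have hgt : d.getD pk 0 > d.getD (pk.1 + dr, pk.2 + dc) 0 := by
          have hn1 := abs_nonneg dr
          have hn2 := abs_nonneg dc
          omega
        simp [h20, hco, hgt, hsav, hdr1, hdc1]
      · have hn1 := abs_nonneg dr
        have hn2 := abs_nonneg dc
        have hdr1 : |dr| ≤ dist := abs_le.mpr ⟨by omega, by omega⟩
        have hdc1 : |dc| ≤ dist := abs_le.mpr ⟨by omega, by omega⟩
        by_cases hgt : d.getD pk 0 > d.getD (pk.1 + dr, pk.2 + dc) 0 <;>
          simp [h20, hco, hgt] <;>
          first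
            | rfl
            | (intros; exfalso; omega)
            | (split_ifs <;> first | rfl | (exfalso; omega))
    · simp [h20, hco]
  · have hn : ¬ (|dr| ≤ dist ∧ |dc| ≤ dist ∧ |dr| + |dc| ≤ 20) := by omega
    simp [h20, hn]

-- B's inner loop over the sorted keys, as the same fold
lemma pv_innerB (d : PySem.Dict (Int × Int) Int) (dist : Int)
    (pk : Int × Int) (pv : Int) (ct : PySem.Dict ((Int × Int) × (Int × Int)) Int) :
    (PySem.List.sorted2 d.keys (fun q => q.1) (fun q => q.2)).foldl (fun ct q =>
        if |q.1 - pk.1| ≤ dist ∧ |q.2 - pk.2| ≤ dist ∧ |q.1 - pk.1| + |q.2 - pk.2| ≤ 20 then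
          if pv - d.getD q 0 - |q.1 - pk.1| - |q.2 - pk.2| > 0 then
            ct.insert (pk, q) (pv - d.getD q 0 - |q.1 - pk.1| - |q.2 - pk.2|)
          else ct
        else ct) ct
      = (((PySem.List.sorted2 d.keys (fun q => q.1) (fun q => q.2)).filter (pvC d dist pk pv)).map
          (pvG d pk pv)).foldl (fun ct e => ct.insert e.1 e.2) ct := by
  rw [List.foldl_map]
  rw [← pv_foldl_ite _ _ (fun ct q => ct.insert (pvG d pk pv q).1 (pvG d pk pv q).2) ct]
  apply PySem.List.foldl_congr_mem
  intro ct q hq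
  have hqk : q ∈ d.keys := (PySem.List.sorted2_perm _ _ _ _).mem_iff.mp hq
  have hco : d.contains q = true := (PySem.Dict.contains_iff_mem_keys _ _).mpr hqk
  simp only [pvC, pvG, hco, Bool.true_and]
  by_cases h1 : |q.1 - pk.1| ≤ dist ∧ |q.2 - pk.2| ≤ dist ∧ |q.1 - pk.1| + |q.2 - pk.2| ≤ 20
  · by_cases h2 : 0 < pv - d.getD q 0 - |q.1 - pk.1| - |q.2 - pk.2| <;> simp [h1, h2]
  · simp [h1]

-- ===== VERDICT (by name: the statement is the Claim_ definition above) =====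
theorem calc_new_cheat_times_spec : Claim_equal_calc_new_cheat_times := by
  intro dm dist _
  unfold Spec_calc_new_cheat_times
  simp only [calc_new_cheat_times, calc_new_cheat_times_alt]
  congr 1
  have hnd := pv_nodup_keys dm
  show ((pvDict dm).keys.foldl _ PySem.Dict.empty).items = ((pvDict dm).items.foldl _ PySem.Dict.empty).items
  congr 1
  conv_lhs => rw [show (pvDict dm).keys = (pvDict dm).items.map (fun e => e.1) from rfl]
  rw [List.foldl_map]
  apply PySem.List.foldl_congr_mem
  intro ct t ht
  have hpk : t.1 ∈ (pvDict dm).keys := PySem.Dict.mem_keys_of_mem_items _ ht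
  have hval : (pvDict dm).getD t.1 0 = t.2 := by
    have ht' : (t.1, t.2) ∈ (pvDict dm).items := by simpa using ht
    exact PySem.Dict.getD_of_mem_items _ ht' hnd 0
  rw [pv_innerA (pvDict dm) hnd dist t.1 hpk ct, pv_innerB (pvDict dm) dist t.1 t.2 ct, hval]
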